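-- pv_equiv track=rewrite | github.com/armandsutt/gomoku | projekt/alphago.py | blast
-- ===== SOURCE A (Python) =====
-- def blast(list):
--     newlist = []
--     for str in list:
--         for i in range(len(str)):
--             if str[i] == "a":
--                 newstring = str[:i] + " " + str[i+1:]
--                 add = True
--                 for string in list:
--                     if newstring in string:
--                         add = False
--                 if add:
--                     newlist.append(newstring)
--     return set(newlist)
-- ===== SOURCE B (Python) =====
-- def blast(list):
--     # Index every substring of every string once; each candidate check is then one hash lookup.
--     subs = {t[i:j+1] for t in list for i in range(len(t)) for j in range(i, len(t))}
--     cands = [s[:i] + " " + s[i+1:] for s in list for i in range(len(s)) if s[i] == "a"]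
--     return {c for c in cands if c not in subs}
-- ===== Notes on version B (the rewrite author's own statement) =====
-- stated objective: faster
-- what changed: Instead of scanning the whole list with a substring search for every candidate, B builds a hash set of all substrings of all strings once and answers each candidate check with a single set lookup.
import Mathlib
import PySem

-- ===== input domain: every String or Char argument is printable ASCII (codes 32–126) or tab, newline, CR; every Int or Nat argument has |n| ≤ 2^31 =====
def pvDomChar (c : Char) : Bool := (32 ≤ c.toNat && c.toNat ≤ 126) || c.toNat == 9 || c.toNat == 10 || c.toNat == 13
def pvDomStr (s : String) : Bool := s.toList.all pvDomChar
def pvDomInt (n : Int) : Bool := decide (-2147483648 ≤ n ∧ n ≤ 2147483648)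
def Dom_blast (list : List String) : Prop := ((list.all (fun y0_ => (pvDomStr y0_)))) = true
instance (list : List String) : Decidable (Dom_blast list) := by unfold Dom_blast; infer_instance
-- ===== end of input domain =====

-- B replaces A's per-candidate substring scan over the whole list by one precomputed set of all
-- substrings of all strings, so each candidate check is a single set lookup (objective: faster).
-- Python string concatenation s[:i] + " " + s[i+1:] is ported exactly as String.ofList of the
-- concatenated code-point lists (string concatenation concatenates the code-point lists).

-- ===== PORT A =====
def blast (list : List String) : List String :=
  PySem.Set.ofList (list.foldl (fun newlist str =>
    (PySem.List.pyRange 0 (PySem.Str.len str) 1).foldl (fun newlist i =>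
      if PySem.Str.pyGet? str i = some 'a' then
        let newstring := String.ofList (PySem.Chars.slice str.toList none (some i) ++ [' '] ++ PySem.Chars.slice str.toList (some (i + 1)) none)
        let add := list.foldl (fun add string => if PySem.Str.isIn newstring string then false else add) true
        if add then newlist ++ [newstring] else newlist
      else newlist) newlist) [])

-- ===== PORT B =====
def blast_alt (list : List String) : List String :=
  let subs : PySem.Set String := PySem.Set.ofList (list.flatMap (fun t =>
    (PySem.List.pyRange 0 (PySem.Str.len t) 1).flatMap (fun i =>
      (PySem.List.pyRange i (PySem.Str.len t) 1).map (fun j =>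
        String.ofList (PySem.Chars.slice t.toList (some i) (some (j + 1)))))))
  let cands : List String := list.flatMap (fun s =>
    ((PySem.List.pyRange 0 (PySem.Str.len s) 1).filter (fun i => PySem.Str.pyGet? s i == some 'a')).map (fun i =>
      String.ofList (PySem.Chars.slice s.toList none (some i) ++ [' '] ++ PySem.Chars.slice s.toList (some (i + 1)) none)))
  PySem.Set.ofList (cands.filter (fun c => !(PySem.Set.contains subs c)))

-- ===== PRECONDITION & SPEC =====
def Spec_blast (list : List String) (out : List String) : Prop := out = blast_alt list
instance (list : List String) (out : List String) : Decidable (Spec_blast list out) := by unfold Spec_blast; infer_instance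

-- ===== CLAIM (what is proved, stated in full; the proofs are below) =====
def Claim_equal_blast : Prop := ∀ (list : List String), Dom_blast list → Spec_blast list (blast list)

-- ===== LEMMAS AND PROOFS =====

-- the candidate string built from s at position i (the expression both ports inline)
def pvCand (s : String) (i : Int) : String :=
  String.ofList (PySem.Chars.slice s.toList none (some i) ++ [' '] ++ PySem.Chars.slice s.toList (some (i + 1)) none)

-- the list of all slices of all strings (what B's set comprehension enumerates)
def pvAllSubs (list : List String) : List String :=
  list.flatMap (fun t =>
    (PySem.List.pyRange 0 (PySem.Str.len t) 1).flatMap (fun i =>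
      (PySem.List.pyRange i (PySem.Str.len t) 1).map (fun j =>
        String.ofList (PySem.Chars.slice t.toList (some i) (some (j + 1))))))

-- A's inner flag loop computes "no string of L contains c"
lemma pv_flag_loop (c : String) (L : List String) (b : Bool) :
    L.foldl (fun add string => if PySem.Str.isIn c string then false else add) b
      = (b && !(L.any (PySem.Str.isIn c))) := by
  induction L generalizing b with
  | nil => simp
  | cons h t ih =>
    simp only [List.foldl_cons, List.any_cons]
    cases hin : PySem.Str.isIn c h
    · rw [if_neg (by simp), ih]; simp
    · rw [if_pos (by simp), ih]; simp

-- nonzero-length slices of t are exactly the nonempty infixes of t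
lemma pv_slice_iff_infix (t c : List Char) (hc : c ≠ []) :
    (∃ i j : Int, 0 ≤ i ∧ i ≤ j ∧ j < (t.length : Int) ∧
        PySem.List.slice t (some i) (some (j + 1)) = c) ↔ c <:+: t := by
  constructor
  · rintro ⟨i, j, hi, hij, hj, hs⟩
    rw [PySem.List.slice_toNat t hi (by omega)] at hs
    rw [← hs]
    exact ((List.take_prefix _ _).isInfix).trans (List.drop_suffix _ _).isInfix
  · rintro ⟨pre, post, rfl⟩
    have hcl : 0 < c.length := List.length_pos_iff.mpr hc
    refine ⟨(pre.length : Int), (pre.length : Int) + (c.length : Int) - 1, ?_, ?_, ?_, ?_⟩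
    · positivity
    · omega
    · simp only [List.length_append]; push_cast; omega
    · have h1 : (pre.length : Int) + (c.length : Int) - 1 + 1 = ((pre.length + c.length : Nat) : Int) := by push_cast; ring
      rw [h1, PySem.List.slice_natCast]
      have h2 : pre.length + c.length - pre.length = c.length := by omega
      rw [h2, List.append_assoc, List.drop_left, List.take_left]

lemma pv_ofList_eq (l : List Char) (c : String) : String.ofList l = c ↔ l = c.toList := by
  constructor
  · rintro rfl; simp
  · rintro h; rw [h]; simp

-- membership in B's substring set = some string of the list contains c
lemma pv_mem_allsubs (list : List String) (c : String) (hc : c.toList ≠ []) :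
    c ∈ pvAllSubs list ↔ (list.any (PySem.Str.isIn c)) = true := by
  rw [List.any_eq_true]
  unfold pvAllSubs
  simp only [List.mem_flatMap, List.mem_map]
  constructor
  · rintro ⟨t, ht, i, hi, j, hj, hs⟩
    refine ⟨t, ht, ?_⟩
    rw [PySem.Str.isIn_iff_infix]
    rw [PySem.Str.len_eq] at hi hj
    rw [PySem.List.mem_pyRange_iff_of_pos one_pos] at hi hj
    rw [pv_ofList_eq] at hs
    rw [← pv_slice_iff_infix t.toList c.toList hc]
    exact ⟨i, j, hi.1, hj.1, hj.2.1, by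
      simpa [PySem.Chars.slice_eq_listSlice] using hs⟩
  · rintro ⟨t, ht, hin⟩
    rw [PySem.Str.isIn_iff_infix, ← pv_slice_iff_infix t.toList c.toList hc] at hin
    obtain ⟨i, j, hi, hij, hj, hs⟩ := hin
    refine ⟨t, ht, i, ?_, j, ?_, ?_⟩
    · rw [PySem.Str.len_eq, PySem.List.mem_pyRange_iff_of_pos one_pos]
      exact ⟨hi, by omega, one_dvd _⟩
    · rw [PySem.Str.len_eq, PySem.List.mem_pyRange_iff_of_pos one_pos]
      exact ⟨hij, hj, one_dvd _⟩
    · rw [pv_ofList_eq]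
      simpa [PySem.Chars.slice_eq_listSlice] using hs

-- every candidate is a nonempty string (it contains the inserted space)
lemma pv_cand_ne (s : String) (i : Int) : (pvCand s i).toList ≠ [] := by
  simp [pvCand]

lemma pv_if_if {α : Type} (P : Prop) [Decidable P] (b : Bool) (x y : α) :
    (if P then (if b then x else y) else y) = if (decide P && b) then x else y := by
  by_cases h : P <;> cases b <;> simp [h]

-- A reduced to a flatMap/filter/map normal form
lemma pv_blast_eq (list : List String) :
    blast list = PySem.Set.ofList (list.flatMap (fun s =>
      ((PySem.List.pyRange 0 (PySem.Str.len s) 1).filter (fun i =>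
          decide (PySem.Str.pyGet? s i = some 'a') && !(list.any (PySem.Str.isIn (pvCand s i))))).map (pvCand s))) := by
  unfold blast
  congr 1
  have hinner : ∀ (s : String) (nl : List String),
      (PySem.List.pyRange 0 (PySem.Str.len s) 1).foldl (fun newlist i =>
        if PySem.Str.pyGet? s i = some 'a' then
          let newstring := String.ofList (PySem.Chars.slice s.toList none (some i) ++ [' '] ++ PySem.Chars.slice s.toList (some (i + 1)) none)
          let add := list.foldl (fun add string => if PySem.Str.isIn newstring string then false else add) true
          if add then newlist ++ [newstring] else newlist
        else newlist) nl
      = nl ++ ((PySem.List.pyRange 0 (PySem.Str.len s) 1).filter (fun i =>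
          decide (PySem.Str.pyGet? s i = some 'a') && !(list.any (PySem.Str.isIn (pvCand s i))))).map (pvCand s) := by
    intro s nl
    rw [← PySem.List.foldl_append_if
      (fun i => decide (PySem.Str.pyGet? s i = some 'a') && !(list.any (PySem.Str.isIn (pvCand s i))))
      (pvCand s)]
    apply PySem.List.foldl_congr_mem
    intro acc i _
    simp only [pv_flag_loop, Bool.true_and, pvCand]
    rw [pv_if_if]
  calc list.foldl (fun newlist str =>
        (PySem.List.pyRange 0 (PySem.Str.len str) 1).foldl (fun newlist i =>
          if PySem.Str.pyGet? str i = some 'a' then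
            let newstring := String.ofList (PySem.Chars.slice str.toList none (some i) ++ [' '] ++ PySem.Chars.slice str.toList (some (i + 1)) none)
            let add := list.foldl (fun add string => if PySem.Str.isIn newstring string then false else add) true
            if add then newlist ++ [newstring] else newlist
          else newlist) newlist) []
      = list.foldl (fun nl s => nl ++ ((PySem.List.pyRange 0 (PySem.Str.len s) 1).filter (fun i =>
          decide (PySem.Str.pyGet? s i = some 'a') && !(list.any (PySem.Str.isIn (pvCand s i))))).map (pvCand s)) [] := by
        apply PySem.List.foldl_congr_mem
        intro acc s _
        exact hinner s acc
    _ = _ := by rw [PySem.List.foldl_append_eq_flatMap]; simp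

-- B reduced to the same normal form
lemma pv_blast_alt_eq (list : List String) :
    blast_alt list = PySem.Set.ofList (list.flatMap (fun s =>
      ((PySem.List.pyRange 0 (PySem.Str.len s) 1).filter (fun i =>
          decide (PySem.Str.pyGet? s i = some 'a') && !(list.any (PySem.Str.isIn (pvCand s i))))).map (pvCand s))) := by
  show PySem.Set.ofList _ = _
  congr 1
  rw [List.filter_flatMap]
  apply List.flatMap_congr
  intro s _
  rw [List.filter_map, List.filter_filter]
  rw [List.filter_congr (q := fun i =>
      decide (PySem.Str.pyGet? s i = some 'a') && !(list.any (PySem.Str.isIn (pvCand s i)))) ?_]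
  · exact List.map_congr_left (fun i _ => rfl)
  · intro i _
    rw [Bool.and_comm]
    simp only [Function.comp_apply]
    congr 1
    · rw [Bool.eq_iff_iff]; simp
    · congr 1
      rw [Bool.eq_iff_iff, PySem.Set.contains_iff, PySem.Set.mem_ofList]
      exact pv_mem_allsubs list (pvCand s i) (pv_cand_ne s i)

-- ===== VERDICT (by name: the statement is the Claim_ definition above) =====
theorem blast_spec : Claim_equal_blast := by
  intro list _
  unfold Spec_blast
  rw [pv_blast_eq, pv_blast_alt_eq]
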